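-- pv_equiv track=rewrite | github.com/federico-santarini/Automazione-Brera | utils.py | groupNonExhibitions
-- ===== SOURCE A (Python) =====
-- from collections import defaultdict
--
-- def groupNonExhibitions(mini_events):
--     nonExhibition = [ev for ev in mini_events
--                      if ev['tipo_attivita'] != 'esposizione']
--     nonExhibition = sorted(nonExhibition,
--                            key=lambda kk: (kk['tipo_attivita'], kk['data']))
--
--     if nonExhibition:
--         nonExhibitionByKind = defaultdict(list)
--         for eachEvent in nonExhibition:
--             nonExhibitionByKind[eachEvent['tipo_attivita']].append(eachEvent)
--         return nonExhibitionByKind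
--     else:
--         return None
-- ===== SOURCE B (Python) =====
-- from collections import defaultdict
--
-- def groupNonExhibitions(mini_events):
--     kinds = sorted({ev['tipo_attivita'] for ev in mini_events
--                     if ev['tipo_attivita'] != 'esposizione'})
--     if not kinds:
--         return None
--     grouped = defaultdict(list)
--     for kind in kinds:
--         bucket = [ev for ev in mini_events if ev['tipo_attivita'] == kind]
--         bucket.sort(key=lambda ev: ev['data'])
--         grouped[kind] = bucket
--     return grouped
-- ===== Notes on version B (the rewrite author's own statement) =====
-- stated objective: alternative
-- what changed: Replaces A's global stable sort by (type, date) followed by a defaultdict grouping pass with computing the sorted set of event types and building each type's bucket independently (filter the events of that type, sort them by date alone).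
import Mathlib
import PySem

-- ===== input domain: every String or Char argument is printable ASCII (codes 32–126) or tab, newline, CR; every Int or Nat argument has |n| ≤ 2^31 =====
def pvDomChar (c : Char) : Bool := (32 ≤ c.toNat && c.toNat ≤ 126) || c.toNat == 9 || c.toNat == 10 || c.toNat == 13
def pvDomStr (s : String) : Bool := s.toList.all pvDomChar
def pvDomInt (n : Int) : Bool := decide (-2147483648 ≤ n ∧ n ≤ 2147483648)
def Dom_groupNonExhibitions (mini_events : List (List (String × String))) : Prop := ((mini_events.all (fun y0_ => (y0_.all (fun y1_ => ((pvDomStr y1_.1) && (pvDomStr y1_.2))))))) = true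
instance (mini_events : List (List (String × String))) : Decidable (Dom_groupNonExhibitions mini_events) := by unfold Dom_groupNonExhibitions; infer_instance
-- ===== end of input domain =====

-- B groups differently: instead of one global stable sort by (type, date) followed by a
-- defaultdict grouping pass, it computes the sorted set of types and builds each type's
-- bucket independently (filter that type's events, sort them by date alone); same results.

-- ev['k'] on an event dict (association list, first match); the default "" is only
-- reachable outside Pre_groupNonExhibitions (Python raises KeyError there).
def pvEvGet (ev : List (String × String)) (k : String) : String :=
  (PySem.Dict.mk ev).getD k ""

-- ===== PORT A =====
def groupNonExhibitions (mini_events : List (List (String × String))) : Option (List (String × List (List (String × String)))) :=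
  let nonExhibition := mini_events.filter (fun ev => pvEvGet ev "tipo_attivita" != "esposizione")
  let nonExhibition₂ := PySem.List.sorted2 nonExhibition
      (fun kk => pvEvGet kk "tipo_attivita") (fun kk => pvEvGet kk "data") false
  if !nonExhibition₂.isEmpty then
    some ((nonExhibition₂.foldl
      (fun d eachEvent => d.modify (pvEvGet eachEvent "tipo_attivita") [] (fun l => l ++ [eachEvent]))
      PySem.Dict.empty).items)
  else
    none

-- ===== PORT B =====
def groupNonExhibitions_alt (mini_events : List (List (String × String))) : Option (List (String × List (List (String × String)))) :=
  let kinds := PySem.List.sorted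
      (PySem.Set.ofList ((mini_events.filter (fun ev => pvEvGet ev "tipo_attivita" != "esposizione")).map
        (fun ev => pvEvGet ev "tipo_attivita")))
      (fun s => s) false
  if kinds.isEmpty then
    none
  else
    some ((kinds.foldl
      (fun d kind => d.insert kind
        (PySem.List.sorted (mini_events.filter (fun ev => pvEvGet ev "tipo_attivita" == kind))
          (fun ev => pvEvGet ev "data") false))
      PySem.Dict.empty).items)

-- ===== PRECONDITION & SPEC =====
-- Pre_ excludes events missing the 'tipo_attivita' key (or missing 'data' on a
-- non-exhibition event), where Python raises KeyError, and events whose pair list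
-- repeats a key, which a Python dict cannot represent (A and B then see only the
-- deduplicated dict and still agree with each other).
def Pre_groupNonExhibitions (mini_events : List (List (String × String))) : Prop :=
  ∀ ev ∈ mini_events, (ev.map (fun p => p.1)).Nodup ∧
    "tipo_attivita" ∈ ev.map (fun p => p.1) ∧
    (pvEvGet ev "tipo_attivita" ≠ "esposizione" → "data" ∈ ev.map (fun p => p.1))
instance (mini_events : List (List (String × String))) : Decidable (Pre_groupNonExhibitions mini_events) := by unfold Pre_groupNonExhibitions; infer_instance

def pvWitness_groupNonExhibitions : (List (List (String × String))) :=
  [[("tipo_attivita", "concerto"), ("data", "2020-01-01")],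
   [("tipo_attivita", "esposizione")]]

def Spec_groupNonExhibitions (mini_events : List (List (String × String))) (out : Option (List (String × List (List (String × String))))) : Prop := out = groupNonExhibitions_alt mini_events
instance (mini_events : List (List (String × String))) (out : Option (List (String × List (List (String × String))))) : Decidable (Spec_groupNonExhibitions mini_events out) := by unfold Spec_groupNonExhibitions; infer_instance

-- ===== CLAIM (what is proved, stated in full; the proofs are below) =====
def Claim_equal_groupNonExhibitions : Prop := ∀ (mini_events : List (List (String × String))), Dom_groupNonExhibitions mini_events → Pre_groupNonExhibitions mini_events → Spec_groupNonExhibitions mini_events (groupNonExhibitions mini_events)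

-- ===== LEMMAS AND PROOFS =====

-- nonstrict and strict lexicographic comparison by two keys (the strict one is
-- definitionally sorted2's comparator for reverse = false)
def pvLe2 {α κ₁ κ₂ : Type} [LinearOrder κ₁] [LinearOrder κ₂] (k1 : α → κ₁) (k2 : α → κ₂) (a b : α) : Prop :=
  k1 a < k1 b ∨ (k1 a = k1 b ∧ k2 a ≤ k2 b)

def pvLt2 {α κ₁ κ₂ : Type} [LinearOrder κ₁] [LinearOrder κ₂] (k1 : α → κ₁) (k2 : α → κ₂) (a b : α) : Bool :=
  decide (k1 a < k1 b) || (!decide (k1 b < k1 a) && decide (k2 a < k2 b))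

theorem pvLt2_true_le2 {α κ₁ κ₂ : Type} [LinearOrder κ₁] [LinearOrder κ₂] {k1 : α → κ₁} {k2 : α → κ₂} {a b : α}
    (h : pvLt2 k1 k2 a b = true) : pvLe2 k1 k2 a b := by
  rcases lt_trichotomy (k1 a) (k1 b) with hab | hab | hab
  · exact Or.inl hab
  · simp [pvLt2, hab] at h
    exact Or.inr ⟨hab, h.le⟩
  · exfalso
    simp [pvLt2, hab, asymm hab] at h

theorem pvLt2_false_le2 {α κ₁ κ₂ : Type} [LinearOrder κ₁] [LinearOrder κ₂] {k1 : α → κ₁} {k2 : α → κ₂} {a b : α}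
    (h : pvLt2 k1 k2 a b = false) : pvLe2 k1 k2 b a := by
  rcases lt_trichotomy (k1 a) (k1 b) with hab | hab | hab
  · exfalso; simp [pvLt2, hab] at h
  · by_cases hk : k2 a < k2 b
    · exfalso; simp [pvLt2, hab, hk] at h
    · exact Or.inr ⟨hab.symm, not_lt.mp hk⟩
  · exact Or.inl hab

theorem pvLe2_trans {α κ₁ κ₂ : Type} [LinearOrder κ₁] [LinearOrder κ₂] {k1 : α → κ₁} {k2 : α → κ₂} {a b c : α}
    (h1 : pvLe2 k1 k2 a b) (h2 : pvLe2 k1 k2 b c) : pvLe2 k1 k2 a c := by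
  rcases h1 with h1 | ⟨e1, l1⟩ <;> rcases h2 with h2 | ⟨e2, l2⟩
  · exact Or.inl (h1.trans h2)
  · exact Or.inl (e2 ▸ h1)
  · exact Or.inl (e1 ▸ h2)
  · exact Or.inr ⟨e1.trans e2, l1.trans l2⟩

theorem pvLt2_of_lt2_le2 {α κ₁ κ₂ : Type} [LinearOrder κ₁] [LinearOrder κ₂] {k1 : α → κ₁} {k2 : α → κ₂} {a b c : α}
    (h1 : pvLt2 k1 k2 a b = true) (h2 : pvLe2 k1 k2 b c) : pvLt2 k1 k2 a c = true := by
  have hbc : k1 b ≤ k1 c := by rcases h2 with h | ⟨e, _⟩; exacts [h.le, e.le]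
  have hab : k1 a ≤ k1 b := by
    rcases pvLt2_true_le2 h1 with h | ⟨e, _⟩; exacts [h.le, e.le]
  rcases lt_trichotomy (k1 a) (k1 c) with hac | hac | hac
  · simp [pvLt2, hac]
  · have e_ab : k1 a = k1 b := le_antisymm hab (by rw [hac]; exact hbc)
    have h2a : k2 a < k2 b := by simpa [pvLt2, e_ab, lt_irrefl] using h1
    have h2b : k2 b ≤ k2 c := by
      rcases h2 with h | ⟨_, l⟩
      · exact absurd h (by rw [← e_ab, hac]; exact lt_irrefl _)
      · exact l
    simp [pvLt2, hac]
    exact lt_of_lt_of_le h2a h2b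
  · exact absurd (hab.trans hbc) (not_le.mpr hac)

theorem insertBy_cons {α : Type} (b : α → α → Bool) (x y : α) (ys : List α) :
    PySem.List.insertBy b x (y :: ys) = if b x y then x :: y :: ys else y :: PySem.List.insertBy b x ys := rfl

theorem pairwise_insertBy {α : Type} (b : α → α → Bool) (R : α → α → Prop)
    (htrans : ∀ x y z, R x y → R y z → R x z)
    (hT : ∀ x y, b x y = true → R x y) (hF : ∀ x y, b x y = false → R y x)
    (x : α) (ys : List α) (h : ys.Pairwise R) :
    (PySem.List.insertBy b x ys).Pairwise R := by
  induction ys with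
  | nil => simp [PySem.List.insertBy]
  | cons y ys ih =>
    rw [insertBy_cons]
    rcases List.pairwise_cons.mp h with ⟨hy, hys⟩
    by_cases hb : b x y = true
    · simp only [hb, if_true]
      refine List.pairwise_cons.mpr ⟨?_, h⟩
      intro z hz
      rcases List.mem_cons.mp hz with hz | hz
      · exact hz ▸ hT _ _ hb
      · exact htrans _ _ _ (hT _ _ hb) (hy _ hz)
    · simp only [Bool.not_eq_true] at hb
      simp only [hb, Bool.false_eq_true, if_false]
      refine List.pairwise_cons.mpr ⟨?_, ih hys⟩
      intro z hz
      rcases (PySem.List.mem_insertBy b x z ys).mp hz with hz | hz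
      · exact hz ▸ hF _ _ hb
      · exact hy _ hz

theorem pairwise_foldl_insertBy {α : Type} (b : α → α → Bool) (R : α → α → Prop)
    (htrans : ∀ x y z, R x y → R y z → R x z)
    (hT : ∀ x y, b x y = true → R x y) (hF : ∀ x y, b x y = false → R y x)
    (xs : List α) (acc : List α) (h : acc.Pairwise R) :
    (xs.foldl (fun a x => PySem.List.insertBy b x a) acc).Pairwise R := by
  induction xs generalizing acc with
  | nil => exact h
  | cons x xs ih => exact ih _ (pairwise_insertBy b R htrans hT hF x acc h)

theorem insertBy_all_before {α : Type} (b : α → α → Bool) (x : α) (zs : List α)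
    (h : ∀ z ∈ zs, b x z = true) : PySem.List.insertBy b x zs = x :: zs := by
  cases zs with
  | nil => rfl
  | cons z zs => rw [insertBy_cons, if_pos (h z (by simp))]

-- filtering a lex insertion by a predicate that fixes the first key commutes with
-- inserting by the second key alone
theorem filter_insertBy {α κ₁ κ₂ : Type} [LinearOrder κ₁] [LinearOrder κ₂]
    (k1 : α → κ₁) (k2 : α → κ₂) (p : α → Bool)
    (hp : ∀ x y, p x = true → p y = true → k1 x = k1 y)
    (x : α) (ys : List α) (hys : ys.Pairwise (pvLe2 k1 k2)) :
    (PySem.List.insertBy (pvLt2 k1 k2) x ys).filter p =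
      if p x then PySem.List.insertBy (fun a c => decide (k2 a < k2 c)) x (ys.filter p)
      else ys.filter p := by
  induction ys with
  | nil =>
    simp only [PySem.List.insertBy, List.filter_nil]
    by_cases hx : p x <;> simp [hx, List.filter]
  | cons y ys ih =>
    rcases List.pairwise_cons.mp hys with ⟨hy, hys'⟩
    rw [insertBy_cons]
    by_cases hb : pvLt2 k1 k2 x y = true
    · simp only [hb, if_true]
      by_cases hx : p x = true
      · by_cases hyp : p y = true
        · have hk : (pvLt2 k1 k2 x y) = decide (k2 x < k2 y) := by
            have he := hp x y hx hyp
            simp [pvLt2, he]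
          rw [if_pos hx]
          simp only [List.filter_cons, hx, hyp, if_true]
          rw [insertBy_cons, ← hk, if_pos hb]
        · simp only [Bool.not_eq_true] at hyp
          rw [if_pos hx]
          simp only [List.filter_cons, hx, hyp, if_true, Bool.false_eq_true, if_false]
          rw [insertBy_all_before]
          intro z hz
          rcases List.mem_filter.mp hz with ⟨hzmem, hzp⟩
          have hxz : pvLt2 k1 k2 x z = true := pvLt2_of_lt2_le2 hb (hy z hzmem)
          have he := hp x z hx hzp
          simpa [pvLt2, he, lt_irrefl] using hxz
      · simp only [Bool.not_eq_true] at hx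
        simp [List.filter_cons, hx]
    · simp only [Bool.not_eq_true] at hb
      simp only [hb, Bool.false_eq_true, if_false]
      by_cases hyp : p y = true
      · by_cases hx : p x = true
        · have he := hp x y hx hyp
          have hk : (pvLt2 k1 k2 x y) = decide (k2 x < k2 y) := by
            simp [pvLt2, he]
          simp only [List.filter_cons, hyp, if_true, if_pos hx]
          rw [insertBy_cons, ← hk, hb]
          simp only [Bool.false_eq_true, if_false, List.cons.injEq, true_and]
          have := ih hys'
          rw [if_pos hx] at this
          exact this
        · simp only [Bool.not_eq_true] at hx
          simp only [List.filter_cons, hyp, if_true, hx, Bool.false_eq_true, if_false]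
          have := ih hys'
          rw [if_neg (by simp [hx])] at this
          simp [this]
      · simp only [Bool.not_eq_true] at hyp
        simp only [List.filter_cons, hyp, Bool.false_eq_true, if_false]
        exact ih hys'

theorem filter_foldl_insertBy {α κ₁ κ₂ : Type} [LinearOrder κ₁] [LinearOrder κ₂]
    (k1 : α → κ₁) (k2 : α → κ₂) (p : α → Bool)
    (hp : ∀ x y, p x = true → p y = true → k1 x = k1 y)
    (xs : List α) (acc : List α) (hacc : acc.Pairwise (pvLe2 k1 k2)) :
    (xs.foldl (fun a x => PySem.List.insertBy (pvLt2 k1 k2) x a) acc).filter p =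
      (xs.filter p).foldl (fun a x => PySem.List.insertBy (fun a c => decide (k2 a < k2 c)) x a) (acc.filter p) := by
  induction xs generalizing acc with
  | nil => simp
  | cons x xs ih =>
    simp only [List.foldl_cons, List.filter_cons]
    have hstep := filter_insertBy k1 k2 p hp x acc hacc
    have hpair : (PySem.List.insertBy (pvLt2 k1 k2) x acc).Pairwise (pvLe2 k1 k2) :=
      pairwise_insertBy _ _ (fun _ _ _ => pvLe2_trans) (fun _ _ => pvLt2_true_le2) (fun _ _ => pvLt2_false_le2) x acc hacc
    by_cases hx : p x = true
    · rw [if_pos hx] at hstep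
      simp only [hx, if_true, List.foldl_cons]
      rw [ih _ hpair, hstep]
    · simp only [Bool.not_eq_true] at hx
      rw [if_neg (by simp [hx])] at hstep
      simp only [hx, Bool.false_eq_true, if_false]
      rw [ih _ hpair, hstep]

theorem sorted2_eq_foldl {α κ₁ κ₂ : Type} [LinearOrder κ₁] [LinearOrder κ₂]
    (xs : List α) (k1 : α → κ₁) (k2 : α → κ₂) :
    PySem.List.sorted2 xs k1 k2 false =
      xs.foldl (fun a x => PySem.List.insertBy (pvLt2 k1 k2) x a) [] := rfl

theorem sorted2_filter {α κ₁ κ₂ : Type} [LinearOrder κ₁] [LinearOrder κ₂]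
    (xs : List α) (k1 : α → κ₁) (k2 : α → κ₂) (p : α → Bool)
    (hp : ∀ x y, p x = true → p y = true → k1 x = k1 y) :
    (PySem.List.sorted2 xs k1 k2 false).filter p = PySem.List.sorted (xs.filter p) k2 false := by
  rw [sorted2_eq_foldl, PySem.List.sorted_eq_foldl_insertBy]
  simpa using filter_foldl_insertBy k1 k2 p hp xs [] List.Pairwise.nil

theorem sorted2_pairwise_le2 {α κ₁ κ₂ : Type} [LinearOrder κ₁] [LinearOrder κ₂]
    (xs : List α) (k1 : α → κ₁) (k2 : α → κ₂) :
    (PySem.List.sorted2 xs k1 k2 false).Pairwise (pvLe2 k1 k2) := by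
  rw [sorted2_eq_foldl]
  exact pairwise_foldl_insertBy _ _ (fun _ _ _ => pvLe2_trans) (fun _ _ => pvLt2_true_le2) (fun _ _ => pvLt2_false_le2) xs [] List.Pairwise.nil

theorem ofList_sublist {α : Type} [BEq α] [LawfulBEq α] (xs : List α) :
    (PySem.Set.ofList xs).Sublist xs := by
  induction xs using List.reverseRecOn with
  | nil => simp [PySem.Set.ofList]
  | append_singleton xs x ih =>
    rw [PySem.Set.ofList_append_singleton, PySem.Set.add_eq_ite]
    by_cases hx : x ∈ PySem.Set.ofList xs
    · rw [if_pos hx]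
      exact ih.trans (List.sublist_append_left xs [x])
    · rw [if_neg hx]
      exact List.Sublist.append ih (List.Sublist.refl [x])

theorem ofList_eq_nil_iff {α : Type} [BEq α] [LawfulBEq α] (xs : List α) :
    PySem.Set.ofList xs = [] ↔ xs = [] := by
  constructor
  · intro h
    cases xs with
    | nil => rfl
    | cons x xs =>
      exfalso
      have : x ∈ PySem.Set.ofList (x :: xs) := (PySem.Set.mem_ofList _ _).mpr (by simp)
      rw [h] at this; exact absurd this (List.not_mem_nil)
  · intro h; subst h; rfl

-- abbreviations used by the main lemmas
def pvK1 (ev : List (String × String)) : String := pvEvGet ev "tipo_attivita"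
def pvKD (ev : List (String × String)) : String := pvEvGet ev "data"
def pvL (me : List (List (String × String))) : List (List (String × String)) :=
  me.filter (fun ev => pvEvGet ev "tipo_attivita" != "esposizione")
def pvS (me : List (List (String × String))) : List (List (String × String)) :=
  PySem.List.sorted2 (pvL me) pvK1 pvKD false

theorem keys_eq (me : List (List (String × String))) :
    PySem.List.sorted (PySem.Set.ofList ((pvL me).map pvK1)) (fun s => s) false =
      PySem.Set.ofList ((pvS me).map pvK1) := by
  apply PySem.List.sorted_eq_of_perm_of_pairwise_lt
  · rw [List.perm_ext_iff_of_nodup (PySem.Set.nodup_ofList _) (PySem.Set.nodup_ofList _)]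
    intro a
    rw [PySem.Set.mem_ofList, PySem.Set.mem_ofList]
    exact ((PySem.List.sorted2_perm (pvL me) pvK1 pvKD false).map pvK1).mem_iff
  · have hpair : ((pvS me).map pvK1).Pairwise (fun a b => a ≤ b) :=
      List.pairwise_map.mpr ((sorted2_pairwise_le2 (pvL me) pvK1 pvKD).imp (by
        intro a b h
        rcases h with h | ⟨h, _⟩
        · exact le_of_lt h
        · exact le_of_eq h))
    have hle : (PySem.Set.ofList ((pvS me).map pvK1)).Pairwise (fun a b => a ≤ b) :=
      List.Pairwise.sublist (ofList_sublist _) hpair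
    have hne : (PySem.Set.ofList ((pvS me).map pvK1)).Pairwise (fun a b => a ≠ b) :=
      PySem.Set.nodup_ofList _
    exact (hle.and hne).imp (fun h => lt_of_le_of_ne h.1 h.2)

theorem bucket_eq (me : List (List (String × String))) (k : String)
    (hk : k ∈ PySem.Set.ofList ((pvS me).map pvK1)) :
    (pvS me).filter (fun ev => pvK1 ev == k) =
      PySem.List.sorted (me.filter (fun ev => pvEvGet ev "tipo_attivita" == k)) (fun ev => pvEvGet ev "data") false := by
  have hkne : k ≠ "esposizione" := by
    rw [PySem.Set.mem_ofList] at hk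
    rcases List.mem_map.mp hk with ⟨ev, hev, hevk⟩
    have hev' : ev ∈ pvL me := ((PySem.List.sorted2_perm (pvL me) pvK1 pvKD false).mem_iff).mp hev
    have := (List.mem_filter.mp hev').2
    simp only [bne_iff_ne, ne_eq] at this
    rw [← hevk]; exact this
  have h1 : (pvS me).filter (fun ev => pvK1 ev == k) =
      PySem.List.sorted ((pvL me).filter (fun ev => pvK1 ev == k)) pvKD false := by
    apply sorted2_filter
    intro x y hx hy
    rw [eq_of_beq hx, eq_of_beq hy]
  rw [h1]
  have h2 : (pvL me).filter (fun ev => pvK1 ev == k) =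
      me.filter (fun ev => pvEvGet ev "tipo_attivita" == k) := by
    unfold pvL
    rw [List.filter_filter]
    apply List.filter_congr
    intro ev _
    simp [pvK1]
    intro h
    rw [h]
    exact hkne
  rw [h2]
  rfl

theorem getD_groupFold (me : List (List (String × String))) (k : String) :
    ((pvS me).foldl
      (fun d eachEvent => d.modify (pvEvGet eachEvent "tipo_attivita") [] (fun l => l ++ [eachEvent]))
      PySem.Dict.empty).getD k [] = (pvS me).filter (fun ev => pvK1 ev == k) := by
  have h := PySem.Dict.getD_foldl_modify_append
    (l := (pvS me).map (fun ev => (pvK1 ev, ev))) (d := PySem.Dict.empty) (c := k)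
  rw [List.foldl_map] at h
  rw [List.filter_map, List.map_map] at h
  simpa [pvK1, Function.comp_def] using h

-- ===== VERDICT (by name: the statement is the Claim_ definition above) =====
theorem groupNonExhibitions_spec : Claim_equal_groupNonExhibitions := by
  intro me _ _
  simp only [Spec_groupNonExhibitions, groupNonExhibitions, groupNonExhibitions_alt]
  have hL : me.filter (fun ev => pvEvGet ev "tipo_attivita" != "esposizione") = pvL me := rfl
  rw [hL]
  have hS : PySem.List.sorted2 (pvL me)
      (fun kk => pvEvGet kk "tipo_attivita") (fun kk => pvEvGet kk "data") false = pvS me := rfl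
  rw [hS]
  have hmap : (pvL me).map (fun ev => pvEvGet ev "tipo_attivita") = (pvL me).map pvK1 := rfl
  rw [hmap, keys_eq me]
  by_cases hSnil : pvS me = []
  · have hKA : PySem.Set.ofList ((pvS me).map pvK1) = [] := by rw [hSnil]; rfl
    rw [hSnil]
    rfl
  · have hKA : PySem.Set.ofList ((pvS me).map pvK1) ≠ [] := by
      intro h
      exact hSnil (List.map_eq_nil_iff.mp ((ofList_eq_nil_iff _).mp h))
    have h1 : (pvS me).isEmpty = false := by simp [hSnil]
    have h2 : (PySem.Set.ofList ((pvS me).map pvK1)).isEmpty = false := by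
      simp [hKA]
    rw [h1, h2]
    simp only [Bool.not_false, if_true, Bool.false_eq_true, if_false, Option.some.injEq]
    -- A side: items of the grouping fold
    have hkeysA : ((pvS me).foldl
        (fun d eachEvent => d.modify (pvEvGet eachEvent "tipo_attivita") [] (fun l => l ++ [eachEvent]))
        PySem.Dict.empty).keys = PySem.Set.ofList ((pvS me).map pvK1) := by
      have h := PySem.Dict.keys_foldl_modify_key (pvS me)
        (fun ev => pvEvGet ev "tipo_attivita") ([] : List (List (String × String)))
        (fun _ ev => fun l => l ++ [ev]) PySem.Dict.empty
      rw [h]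
      rfl
    have hnodupA : ((pvS me).foldl
        (fun d eachEvent => d.modify (pvEvGet eachEvent "tipo_attivita") [] (fun l => l ++ [eachEvent]))
        PySem.Dict.empty).keys.Nodup := by
      apply PySem.Dict.nodup_keys_foldl_modify_key
      simp
    rw [PySem.Dict.items_eq_map_keys _ hnodupA [], hkeysA]
    -- B side: items of the insert fold over fresh distinct kinds
    have hfresh : ∀ a ∈ PySem.Set.ofList ((pvS me).map pvK1),
        (PySem.Dict.empty : PySem.Dict String (List (List (String × String)))).contains a = false := by
      intro a _
      simp
    have hnodupB : ((PySem.Set.ofList ((pvS me).map pvK1)).map (fun a => a)).Nodup := by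
      simp only [List.map_id']
      exact PySem.Set.nodup_ofList ((pvS me).map pvK1)
    rw [PySem.Dict.items_foldl_insert_fresh (PySem.Set.ofList ((pvS me).map pvK1)) (fun a => a)
      (fun kind => PySem.List.sorted (me.filter (fun ev => pvEvGet ev "tipo_attivita" == kind))
        (fun ev => pvEvGet ev "data") false) PySem.Dict.empty hfresh hnodupB]
    simp only [show (PySem.Dict.empty : PySem.Dict String (List (List (String × String)))).items = [] from rfl,
      List.nil_append]
    apply List.map_congr_left
    intro k hk
    rw [getD_groupFold me k, bucket_eq me k hk]
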